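-- pv_equiv track=rewrite | github.com/jonswain/PhaKinPro | PhaKinPro/phakinpro.py | multiclass_ranking
-- ===== SOURCE A (Python) =====
-- def multiclass_ranking(ordered_preds: list) -> int:
--     idx = 0
--     one_detected = False
--     for i, o in enumerate(ordered_preds):
--         if int(o) == 1:
--             if not one_detected:
--                 idx = i + 1
--                 one_detected = True
--         if int(o) == 0:
--             if one_detected:
--                 idx = 0
--                 return idx
--     return idx if idx != 0 else len(ordered_preds) + 1
-- ===== SOURCE B (Python) =====
-- def multiclass_ranking(ordered_preds: list) -> int:
--     # Single right-to-left pass: walking backwards, remember whether a 0 lies to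
--     # the right; every 1 encountered overwrites the answer, so the leftmost 1
--     # (processed last) decides: 0 if a 0 follows it, else its 1-based position.
--     ans = len(ordered_preds) + 1
--     zero_right = False
--     for i, o in reversed(list(enumerate(ordered_preds))):
--         v = int(o)
--         if v == 1:
--             ans = 0 if zero_right else i + 1
--         if v == 0:
--             zero_right = True
--     return ans
-- ===== Notes on version B (the rewrite author's own statement) =====
-- stated objective: alternative
-- what changed: Replaces A's forward flag-and-accumulator scan with a single right-to-left pass that tracks whether a 0 lies to the right and lets each 1 overwrite the answer, so the leftmost 1 decides last.
import Mathlib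
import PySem

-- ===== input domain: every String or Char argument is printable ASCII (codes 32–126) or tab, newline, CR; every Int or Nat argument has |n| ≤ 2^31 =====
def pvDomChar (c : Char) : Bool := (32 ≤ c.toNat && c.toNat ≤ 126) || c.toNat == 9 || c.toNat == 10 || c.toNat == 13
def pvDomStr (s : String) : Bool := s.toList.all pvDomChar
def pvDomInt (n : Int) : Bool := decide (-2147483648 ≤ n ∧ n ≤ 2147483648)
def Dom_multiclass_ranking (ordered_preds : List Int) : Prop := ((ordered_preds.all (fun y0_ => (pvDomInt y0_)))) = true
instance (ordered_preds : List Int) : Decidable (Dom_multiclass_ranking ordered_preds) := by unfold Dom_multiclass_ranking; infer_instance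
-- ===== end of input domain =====

-- B replaces A's forward flag-and-accumulator loop by a single right-to-left pass
-- (track 'a 0 lies to the right'; each 1 overwrites the answer): an alternative
-- traversal order of the same O(n) cost.


-- ===== PORT A =====
-- A's for-loop: state (idx, one_detected), index i, early `return 0` inside the loop;
-- the final `return idx if idx != 0 else len(..)+1` needs the length n.
def mrA_loop (n : Int) : List Int → Int → Int → Bool → Int
  | [], _, idx, _ => if idx ≠ 0 then idx else n + 1
  | o :: rest, i, idx, one_detected =>
    let s : Int × Bool :=
      if o = 1 then (if !one_detected then (i + 1, true) else (idx, one_detected))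
      else (idx, one_detected)
    if o = 0 then
      (if s.2 then 0 else mrA_loop n rest (i + 1) s.1 s.2)
    else mrA_loop n rest (i + 1) s.1 s.2

def multiclass_ranking (ordered_preds : List Int) : Int :=
  mrA_loop ((ordered_preds.length : Int)) ordered_preds 0 0 false

-- ===== PORT B =====
-- enumerate(ordered_preds) with Python's int indices
def mrIndexed : List Int → Int → List (Int × Int)
  | [], _ => []
  | o :: rest, i => (i, o) :: mrIndexed rest (i + 1)

-- Source B's backwards loop over reversed(list(enumerate(..))): state (ans, zero_right)
def mrB_loop : List (Int × Int) → Int × Bool → Int × Bool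
  | [], s => s
  | (i, v) :: rest, (ans, zr) =>
    mrB_loop rest
      (if v = 1 then (if zr then 0 else i + 1) else ans,
       if v = 0 then true else zr)

def multiclass_ranking_alt (ordered_preds : List Int) : Int :=
  (mrB_loop ((mrIndexed ordered_preds 0).reverse)
            ((ordered_preds.length : Int) + 1, false)).1

-- ===== PRECONDITION & SPEC =====
def Spec_multiclass_ranking (ordered_preds : List Int) (out : Int) : Prop := out = multiclass_ranking_alt ordered_preds
instance (ordered_preds : List Int) (out : Int) : Decidable (Spec_multiclass_ranking ordered_preds out) := by unfold Spec_multiclass_ranking; infer_instance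

-- ===== CLAIM (what is proved, stated in full; the proofs are below) =====
def Claim_equal_multiclass_ranking : Prop := ∀ (ordered_preds : List Int), Dom_multiclass_ranking ordered_preds → Spec_multiclass_ranking ordered_preds (multiclass_ranking ordered_preds)

-- ===== LEMMAS AND PROOFS =====

-- proof-only reference: is there a 0 in the list?
def mrHas0 : List Int → Bool
  | [] => false
  | o :: rest => if o = 0 then true else mrHas0 rest

-- proof-only reference answer: leftmost 1 decides (0 if a 0 follows it, else its
-- 1-based position); a0 if there is no 1; zr0 = "a 0 already seen to the right"
def mrRes : List Int → Int → Int → Bool → Int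
  | [], _, a0, _ => a0
  | o :: rest, i, a0, zr0 =>
    if o = 1 then (if mrHas0 rest || zr0 then 0 else i + 1)
    else mrRes rest (i + 1) a0 zr0

theorem mrB_loop_append (xs ys : List (Int × Int)) (s : Int × Bool) :
    mrB_loop (xs ++ ys) s = mrB_loop ys (mrB_loop xs s) := by
  induction xs generalizing s with
  | nil => rfl
  | cons p rest ih => obtain ⟨i, v⟩ := p; obtain ⟨a, z⟩ := s; simp [mrB_loop, ih]

-- full-state characterization of B's backwards pass
theorem mrB_loop_char (l : List Int) (i a0 : Int) (zr0 : Bool) :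
    mrB_loop ((mrIndexed l i).reverse) (a0, zr0)
      = (mrRes l i a0 zr0, zr0 || mrHas0 l) := by
  induction l generalizing i zr0 with
  | nil => simp [mrIndexed, mrB_loop, mrRes, mrHas0]
  | cons o rest ih =>
    simp only [mrIndexed, mrRes, mrHas0, List.reverse_cons, mrB_loop_append, ih]
    by_cases h1 : o = 1 <;> by_cases h0 : o = 0 <;>
      simp_all <;> cases zr0 <;> simp_all [mrB_loop]

-- after the first 1 was seen: A's loop returns 0 iff a 0 remains, else the saved idx
theorem mrA_loop_detected (n : Int) (l : List Int) (i idx : Int) (hidx : idx ≠ 0) :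
    mrA_loop n l i idx true = if mrHas0 l then 0 else idx := by
  induction l generalizing i with
  | nil => simp [mrA_loop, mrHas0, hidx]
  | cons o rest ih =>
    simp only [mrA_loop, mrHas0]
    by_cases h0 : o = 0 <;> by_cases h1 : o = 1 <;> simp [h0, h1, ih]

-- before any 1 was seen: A's loop equals the reference answer
theorem mrA_loop_search (n : Int) (l : List Int) (i : Int) (hi : 0 ≤ i) :
    mrA_loop n l i 0 false = mrRes l i (n + 1) false := by
  induction l generalizing i with
  | nil => simp [mrA_loop, mrRes]
  | cons o rest ih =>
    simp only [mrA_loop, mrRes]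
    by_cases h1 : o = 1
    · have hne : (i + 1 : Int) ≠ 0 := by omega
      simp [h1, mrA_loop_detected n rest (i + 1) (i + 1) hne]
    · by_cases h0 : o = 0 <;> simp [h0, h1, ih (i + 1) (by omega)]

-- ===== VERDICT (by name: the statement is the Claim_ definition above) =====
theorem multiclass_ranking_spec : Claim_equal_multiclass_ranking := by
  intro l _
  unfold Spec_multiclass_ranking multiclass_ranking multiclass_ranking_alt
  rw [mrB_loop_char]
  exact mrA_loop_search _ l 0 le_rfl
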